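-- pv_equiv track=rewrite | github.com/matthewc193/LineEdits-DynamicProgramming | LineEdits.py | line_edits
-- ===== SOURCE A (Python) =====
-- def back_trace(table,s1,s2):
--     res = []
--     m = len(s2)
--     n = len(s1)
--     while n != 0 or m != 0:
--         if n == 0 or m == 0:
--             if n == 0 and m == 0:
--                 return res
--             if n == 0:
--                 res.append(('I', '', s2[m-1]))
--                 m -= 1
--             elif m == 0:
--                 res.append(('D',s1[n-1], ''))
--                 n -= 1
--         elif s2[m-1] == s1[n-1]:
--             res.append(('C',s1[n-1], s2[m-1]))
--             n -= 1
--             m -= 1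
--         elif table[n-1][m-1] <= table[n-1][m] and table[n-1][m-1] <= table[n][m-1]:
--             res.append(('S', s1[n-1], s2[m-1]))
--             n -= 1
--             m -= 1
--         elif table[n-1][m] <= table[n][m-1]:
--             res.append(('D', s1[n-1],''))
--             n -= 1
--         else:
--             res.append(('I', '', s2[m-1]))
--             m -= 1
--     return res[::-1]
--
-- def line_edits(s1, s2):
--     s1 = s1.splitlines()
--     s2 = s2.splitlines()
--     table = [[0]*(len(s2)+1) for _ in range(len(s1)+1)]
--     for i in range(len(s1)+1):
--         for j in range(len(s2)+1):
--             if i == 0: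
--                 table[i][j] = j
--             elif j == 0:
--                 table[i][j] = i
--             elif s1[i-1] == s2[j-1]:
--                 table[i][j] = table[i-1][j-1]
--             else:
--                 table[i][j] = min(table[i-1][j-1], table[i][j-1], table[i-1][j]) + 1
--     return back_trace(table,s1,s2)
-- ===== SOURCE B (Python) =====
-- def line_edits(s1, s2):
--     xs = s1.splitlines()
--     ys = s2.splitlines()
--     n, m = len(xs), len(ys)
--     # numeric DP table plus a parallel backpointer table of ops
--     num = [list(range(m + 1))] + [[i] + [0] * m for i in range(1, n + 1)]
--     op = [['I'] * (m + 1)] + [['D'] + [''] * m for _ in range(1, n + 1)]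
--     for i in range(1, n + 1):
--         for j in range(1, m + 1):
--             d, u, l = num[i - 1][j - 1], num[i - 1][j], num[i][j - 1]
--             if xs[i - 1] == ys[j - 1]:
--                 num[i][j] = d
--                 op[i][j] = 'C'
--             else:
--                 num[i][j] = min(d, u, l) + 1
--                 op[i][j] = 'S' if (d <= u and d <= l) else ('D' if u <= l else 'I')
--     res = []
--     i, j = n, m
--     while i or j:
--         o = op[i][j]
--         if o == 'C' or o == 'S':
--             res.append((o, xs[i - 1], ys[j - 1]))
--             i -= 1
--             j -= 1
--         elif o == 'D':
--             res.append(('D', xs[i - 1], ''))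
--             i -= 1
--         else:
--             res.append(('I', '', ys[j - 1]))
--             j -= 1
--     res.reverse()
--     return res
-- ===== Notes on version B (the rewrite author's own statement) =====
-- stated objective: alternative
-- what changed: B fills a parallel backpointer table op[i][j] recording the chosen move ('C'/'S'/'D'/'I', with 'I'/'D' boundary rows) during the forward DP, and the backtrace just follows the stored ops, instead of A's backtrace re-deriving each decision from neighbouring costs of the numeric table.
import Mathlib
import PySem

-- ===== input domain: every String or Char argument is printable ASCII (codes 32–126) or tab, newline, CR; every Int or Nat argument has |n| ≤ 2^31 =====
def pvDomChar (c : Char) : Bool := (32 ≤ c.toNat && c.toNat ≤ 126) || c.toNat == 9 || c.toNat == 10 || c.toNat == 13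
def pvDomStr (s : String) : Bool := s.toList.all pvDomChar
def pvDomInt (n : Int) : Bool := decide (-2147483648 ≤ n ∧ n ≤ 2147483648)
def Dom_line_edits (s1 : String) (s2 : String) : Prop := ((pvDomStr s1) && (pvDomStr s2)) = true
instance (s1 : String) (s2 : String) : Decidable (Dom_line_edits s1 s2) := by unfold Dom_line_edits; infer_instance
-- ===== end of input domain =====

-- B re-implements the same O(n·m) line edit script with a parallel backpointer (op) table filled
-- during the forward DP, so the backtrace follows stored ops instead of re-deriving decisions from
-- neighbouring costs; same cost class, alternative structure.

-- ===== PORT A =====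
-- min(x, y, z) as A's table-fill uses it
def pvMin3 (a b c : Int) : Int := min (min a b) c

-- inner loop of A's table fill for one row: walks prev row (d = table[i-1][j-1], u = table[i-1][j])
-- carrying left = table[i][j-1]; all Python indexing here is in range, so List.getD is exact.
def pvRowAGo (a : String) : List Int → Int → List String → List Int
  | d :: u :: rest, left, y :: ys =>
      let v := if a = y then d else pvMin3 d left u + 1
      v :: pvRowAGo a (u :: rest) v ys
  | _, _, _ => []

def pvRow0 (m : Nat) : List Int := (List.range (m + 1)).map (fun k => Int.ofNat k)

-- outer loop of A's table fill (row i from row i-1); c is the current row index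
def pvTableAGo (ys : List String) : List Int → Int → List String → List (List Int)
  | _, _, [] => []
  | prev, c, a :: xs =>
      let r := c :: pvRowAGo a prev c ys
      r :: pvTableAGo ys r (c + 1) xs

def pvTableA (xs ys : List String) : List (List Int) :=
  pvRow0 ys.length :: pvTableAGo ys (pvRow0 ys.length) 1 xs

def pvGet2 (t : List (List Int)) (i j : Nat) : Int := (t.getD i []).getD j 0

-- A's back_trace while-loop; produces the list in push order (line_edits reverses it, as Python's res[::-1])
def pvBackA (t : List (List Int)) (xs ys : List String) : Nat → Nat → List (String × String × String)
  | 0, 0 => []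
  | 0, m + 1 => ("I", "", ys.getD m "") :: pvBackA t xs ys 0 m
  | n + 1, 0 => ("D", xs.getD n "", "") :: pvBackA t xs ys n 0
  | n + 1, m + 1 =>
      if ys.getD m "" = xs.getD n "" then
        ("C", xs.getD n "", ys.getD m "") :: pvBackA t xs ys n m
      else if pvGet2 t n m ≤ pvGet2 t n (m + 1) ∧ pvGet2 t n m ≤ pvGet2 t (n + 1) m then
        ("S", xs.getD n "", ys.getD m "") :: pvBackA t xs ys n m
      else if pvGet2 t n (m + 1) ≤ pvGet2 t (n + 1) m then
        ("D", xs.getD n "", "") :: pvBackA t xs ys n (m + 1)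
      else
        ("I", "", ys.getD m "") :: pvBackA t xs ys (n + 1) m
  termination_by n m => n + m

def line_edits (s1 : String) (s2 : String) : List (String × String × String) :=
  let xs := PySem.Str.splitlines s1
  let ys := PySem.Str.splitlines s2
  (pvBackA (pvTableA xs ys) xs ys xs.length ys.length).reverse

-- ===== PORT B =====
-- B's inner loop: fills (cost, op) pairs for one row; op records the backtrace decision
def pvRowBGo (a : String) : List (Int × String) → Int → List String → List (Int × String)
  | p :: q :: rest, left, y :: ys =>
      let e := if a = y then (p.1, "C")
               else (min (min p.1 q.1) left + 1,
                     if p.1 ≤ q.1 ∧ p.1 ≤ left then "S" else if q.1 ≤ left then "D" else "I")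
      e :: pvRowBGo a (q :: rest) e.1 ys
  | _, _, _ => []

def pvRow0B (m : Nat) : List (Int × String) := (List.range (m + 1)).map (fun k => (Int.ofNat k, "I"))

def pvTableBGo (ys : List String) : List (Int × String) → Int → List String → List (List (Int × String))
  | _, _, [] => []
  | prev, c, a :: xs =>
      let r := (c, "D") :: pvRowBGo a prev c ys
      r :: pvTableBGo ys r (c + 1) xs

def pvTableB (xs ys : List String) : List (List (Int × String)) :=
  pvRow0B ys.length :: pvTableBGo ys (pvRow0B ys.length) 1 xs

def pvOpAt (t : List (List (Int × String))) (i j : Nat) : String := ((t.getD i []).getD j (0, "")).2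

-- B's backtrace: follow the stored ops; fuel = i + j makes the loop total (unreachable 0-fuel case)
def pvBackBGo (t : List (List (Int × String))) (xs ys : List String) :
    Nat → Nat → Nat → List (String × String × String)
  | 0, _, _ => []
  | fuel + 1, n, m =>
      if n = 0 ∧ m = 0 then []
      else
        let o := pvOpAt t n m
        if o = "C" ∨ o = "S" then (o, xs.getD (n - 1) "", ys.getD (m - 1) "") :: pvBackBGo t xs ys fuel (n - 1) (m - 1)
        else if o = "D" then ("D", xs.getD (n - 1) "", "") :: pvBackBGo t xs ys fuel (n - 1) m
        else ("I", "", ys.getD (m - 1) "") :: pvBackBGo t xs ys fuel n (m - 1)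

def line_edits_alt (s1 : String) (s2 : String) : List (String × String × String) :=
  let xs := PySem.Str.splitlines s1
  let ys := PySem.Str.splitlines s2
  let t := pvTableB xs ys
  (pvBackBGo t xs ys (xs.length + ys.length) xs.length ys.length).reverse

-- ===== PRECONDITION & SPEC =====
def Spec_line_edits (s1 : String) (s2 : String) (out : List (String × String × String)) : Prop := out = line_edits_alt s1 s2
instance (s1 : String) (s2 : String) (out : List (String × String × String)) : Decidable (Spec_line_edits s1 s2 out) := by unfold Spec_line_edits; infer_instance

-- ===== CLAIM (what is proved, stated in full; the proofs are below) =====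
def Claim_equal_line_edits : Prop := ∀ (s1 : String) (s2 : String), Dom_line_edits s1 s2 → Spec_line_edits s1 s2 (line_edits s1 s2)

-- ===== LEMMAS AND PROOFS =====

-- the abstract DP cost table both programs compute
def pvT (xs ys : List String) : Nat → Nat → Int
  | 0, j => (j : Int)
  | i + 1, 0 => (i : Int) + 1
  | i + 1, j + 1 =>
      if xs.getD i "" = ys.getD j "" then pvT xs ys i j
      else pvMin3 (pvT xs ys i j) (pvT xs ys (i + 1) j) (pvT xs ys i (j + 1)) + 1
  termination_by i j => (i, j)

-- A's rows as an indexed family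
def pvRowF (xs ys : List String) : Nat → List Int
  | 0 => pvRow0 ys.length
  | i + 1 => ((i : Int) + 1) :: pvRowAGo (xs.getD i "") (pvRowF xs ys i) ((i : Int) + 1) ys

def pvRowFB (xs ys : List String) : Nat → List (Int × String)
  | 0 => pvRow0B ys.length
  | i + 1 => (((i : Int) + 1), "D") :: pvRowBGo (xs.getD i "") (pvRowFB xs ys i) ((i : Int) + 1) ys

theorem pvRowAGo_length (a : String) : ∀ (ys' : List String) (prev : List Int) (left : Int),
    ys'.length + 1 ≤ prev.length → (pvRowAGo a prev left ys').length = ys'.length := by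
  intro ys'
  induction ys' with
  | nil => intro prev left _; cases prev with
    | nil => simp [pvRowAGo]
    | cons d rest => cases rest <;> simp [pvRowAGo]
  | cons y ys ih =>
    intro prev left h
    match prev, h with
    | d :: u :: rest, h =>
      simp only [pvRowAGo, List.length_cons]
      rw [ih (u :: rest) _ (by simpa using h)]

theorem pvRowAGo_getD (a : String) : ∀ (j : Nat) (ys' : List String) (prev : List Int) (left : Int),
    j < ys'.length → ys'.length + 1 ≤ prev.length →
    (pvRowAGo a prev left ys').getD j 0 =
      (if a = ys'.getD j "" then prev.getD j 0
       else pvMin3 (prev.getD j 0)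
              (if j = 0 then left else (pvRowAGo a prev left ys').getD (j - 1) 0)
              (prev.getD (j + 1) 0) + 1) := by
  intro j
  induction j with
  | zero =>
    intro ys' prev left h hl
    match ys', prev, h, hl with
    | y :: ys, d :: u :: rest, _, _ => simp [pvRowAGo]
  | succ j ih =>
    intro ys' prev left h hl
    match ys', prev, h, hl with
    | y :: ys, d :: u :: rest, h, hl =>
      have h' : j < ys.length := by simpa using h
      have hl' : ys.length + 1 ≤ (u :: rest).length := by simpa using hl
      simp only [pvRowAGo, List.getD_cons_succ]
      rw [ih ys (u :: rest) _ h' hl']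
      cases j with
      | zero => simp
      | succ k => simp

theorem pvRowBGo_fst (a : String) : ∀ (ys' : List String) (prev : List (Int × String)) (left : Int),
    (pvRowBGo a prev left ys').map Prod.fst = pvRowAGo a (prev.map Prod.fst) left ys' := by
  intro ys'
  induction ys' with
  | nil => intro prev left; cases prev with
    | nil => simp [pvRowAGo, pvRowBGo]
    | cons d rest => cases rest <;> simp [pvRowAGo, pvRowBGo]
  | cons y ys ih =>
    intro prev left
    match prev with
    | [] => simp [pvRowAGo, pvRowBGo]
    | [d] => simp [pvRowAGo, pvRowBGo]
    | p :: q :: rest =>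
      simp only [pvRowAGo, pvRowBGo, List.map_cons]
      have hm : min (min p.1 q.1) left + 1 = pvMin3 p.1 left q.1 + 1 := by
        unfold pvMin3; rw [min_assoc, min_comm q.1 left, ← min_assoc]
      by_cases h : a = y
      · subst h
        simp only [ite_true]
        rw [ih (q :: rest) p.1]
        simp
      · simp only [if_neg h]
        rw [ih (q :: rest) _, hm]
        simp

theorem pvRowBGo_snd (a : String) : ∀ (j : Nat) (ys' : List String) (prev : List (Int × String)) (left : Int),
    j < ys'.length → ys'.length + 1 ≤ prev.length →
    ((pvRowBGo a prev left ys').getD j (0, "")).2 =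
      (if a = ys'.getD j "" then "C"
       else if (prev.getD j (0, "")).1 ≤ (prev.getD (j + 1) (0, "")).1 ∧
               (prev.getD j (0, "")).1 ≤ (if j = 0 then left else ((pvRowBGo a prev left ys').getD (j - 1) (0, "")).1)
            then "S"
            else if (prev.getD (j + 1) (0, "")).1 ≤ (if j = 0 then left else ((pvRowBGo a prev left ys').getD (j - 1) (0, "")).1)
            then "D" else "I") := by
  intro j
  induction j with
  | zero =>
    intro ys' prev left h hl
    match ys', prev, h, hl with
    | y :: ys, p :: q :: rest, _, _ =>
      by_cases hy : a = y <;> simp [pvRowBGo, hy]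
  | succ j ih =>
    intro ys' prev left h hl
    match ys', prev, h, hl with
    | y :: ys, p :: q :: rest, h, hl =>
      have h' : j < ys.length := by simpa using h
      have hl' : ys.length + 1 ≤ (q :: rest).length := by simpa using hl
      simp only [pvRowBGo, List.getD_cons_succ]
      rw [ih ys (q :: rest) _ h' hl']
      cases j with
      | zero => by_cases hy : a = y <;> simp [hy]
      | succ k => by_cases hy : a = y <;> simp [hy]

theorem pvRowF_length (xs ys : List String) : ∀ i, (pvRowF xs ys i).length = ys.length + 1 := by
  intro i
  induction i with
  | zero => simp [pvRowF, pvRow0]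
  | succ i ih =>
    simp only [pvRowF, List.length_cons]
    rw [pvRowAGo_length _ _ _ _ (by omega)]

theorem pvRowFB_fst (xs ys : List String) : ∀ i, (pvRowFB xs ys i).map Prod.fst = pvRowF xs ys i := by
  intro i
  induction i with
  | zero =>
    simp only [pvRowFB, pvRowF, pvRow0B, pvRow0, List.map_map]
    apply List.map_congr_left
    intro k _
    simp
  | succ i ih =>
    simp only [pvRowFB, pvRowF, List.map_cons]
    rw [pvRowBGo_fst, ih]

theorem pvRowFB_length (xs ys : List String) : ∀ i, (pvRowFB xs ys i).length = ys.length + 1 := by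
  intro i
  have := congrArg List.length (pvRowFB_fst xs ys i)
  simpa [pvRowF_length] using this

-- getD through Prod.fst (defaults agree componentwise)
theorem pvFstGetD : ∀ (l : List (Int × String)) (j : Nat),
    (l.map Prod.fst).getD j 0 = (l.getD j (0, "")).1 := by
  intro l
  induction l with
  | nil => intro j; simp
  | cons p t ih =>
    intro j
    cases j with
    | zero => simp
    | succ k => simpa using ih k

-- A's rows compute pvT
theorem pvRowF_getD (xs ys : List String) :
    ∀ i j, j ≤ ys.length → (pvRowF xs ys i).getD j 0 = pvT xs ys i j := by
  intro i
  induction i with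
  | zero =>
    intro j hj
    have hj' : j < ys.length + 1 := by omega
    have hlt : j < (pvRowF xs ys 0).length := by
      simp [pvRowF, pvRow0]; omega
    rw [List.getD_eq_getElem _ _ hlt]
    simp only [pvRowF, pvRow0, List.getElem_map, List.getElem_range]
    simp [pvT]
  | succ i ih =>
    intro j
    induction j with
    | zero => intro _; simp [pvRowF, pvT]
    | succ j ih2 =>
      intro hj
      have hj' : j < ys.length := by omega
      have hlen : ys.length + 1 ≤ (pvRowF xs ys i).length := by rw [pvRowF_length]
      simp only [pvRowF, List.getD_cons_succ]
      rw [pvRowAGo_getD _ j ys (pvRowF xs ys i) _ hj' hlen]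
      conv_rhs => rw [pvT]
      rw [ih j (by omega), ih (j + 1) (by omega)]
      cases j with
      | zero => simp [pvT]
      | succ k =>
        have hk := ih2 (by omega)
        simp only [pvRowF, List.getD_cons_succ] at hk
        rw [if_neg (Nat.succ_ne_zero k)]
        simp only [Nat.add_sub_cancel]
        simp only [List.getD_eq_getElem?_getD] at hk ⊢
        rw [hk]

-- the built tables list the row families
theorem pvTableAGo_rowF (xs ys : List String) :
    ∀ (n i : Nat), xs.length - i = n → i ≤ xs.length →
    pvTableAGo ys (pvRowF xs ys i) ((i : Int) + 1) (xs.drop i) =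
      (List.range' (i + 1) (xs.length - i)).map (pvRowF xs ys) := by
  intro n
  induction n with
  | zero =>
    intro i hn hi
    have hd : xs.drop i = [] := by rw [List.drop_eq_nil_iff]; omega
    rw [hd, hn]
    simp only [List.range'_zero, List.map_nil]
    rfl
  | succ n ihn =>
    intro i hn hi
    have hi' : i < xs.length := by omega
    have hdrop : xs.drop i = xs.getD i "" :: xs.drop (i + 1) := by
      rw [List.drop_eq_getElem_cons hi', List.getD_eq_getElem _ _ hi']
    rw [hdrop, hn]
    simp only [pvTableAGo, List.range'_succ, List.map_cons]
    have h1 : pvRowF xs ys (i + 1) =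
        ((i : Int) + 1) :: pvRowAGo (xs.getD i "") (pvRowF xs ys i) ((i : Int) + 1) ys := by
      simp [pvRowF]
    have h2 : ((i : Int) + 1) + 1 = ((i + 1 : Nat) : Int) + 1 := by push_cast; ring
    rw [← h1, h2, ihn (i + 1) (by omega) (by omega)]
    have h3 : xs.length - (i + 1) = n := by omega
    rw [h3]

theorem pvTableA_getD (xs ys : List String) :
    ∀ i, i ≤ xs.length → (pvTableA xs ys).getD i [] = pvRowF xs ys i := by
  intro i hi
  cases i with
  | zero => simp [pvTableA, pvRowF]
  | succ i =>
    have h0 : pvRowF xs ys 0 = pvRow0 ys.length := rfl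
    have := pvTableAGo_rowF xs ys xs.length 0 (by omega) (by omega)
    simp only [Nat.cast_zero, zero_add, List.drop_zero, h0, Nat.sub_zero] at this
    simp only [pvTableA, List.getD_cons_succ, this]
    have hlt : i < ((List.range' 1 xs.length).map (pvRowF xs ys)).length := by
      simp; omega
    rw [List.getD_eq_getElem _ _ hlt, List.getElem_map, List.getElem_range']
    congr 1
    omega

theorem pvTableBGo_rowFB (xs ys : List String) :
    ∀ (n i : Nat), xs.length - i = n → i ≤ xs.length →
    pvTableBGo ys (pvRowFB xs ys i) ((i : Int) + 1) (xs.drop i) =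
      (List.range' (i + 1) (xs.length - i)).map (pvRowFB xs ys) := by
  intro n
  induction n with
  | zero =>
    intro i hn hi
    have hd : xs.drop i = [] := by rw [List.drop_eq_nil_iff]; omega
    rw [hd, hn]
    simp only [List.range'_zero, List.map_nil]
    rfl
  | succ n ihn =>
    intro i hn hi
    have hi' : i < xs.length := by omega
    have hdrop : xs.drop i = xs.getD i "" :: xs.drop (i + 1) := by
      rw [List.drop_eq_getElem_cons hi', List.getD_eq_getElem _ _ hi']
    rw [hdrop, hn]
    simp only [pvTableBGo, List.range'_succ, List.map_cons]
    have h1 : pvRowFB xs ys (i + 1) =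
        (((i : Int) + 1), "D") :: pvRowBGo (xs.getD i "") (pvRowFB xs ys i) ((i : Int) + 1) ys := by
      simp [pvRowFB]
    have h2 : ((i : Int) + 1) + 1 = ((i + 1 : Nat) : Int) + 1 := by push_cast; ring
    rw [← h1, h2, ihn (i + 1) (by omega) (by omega)]
    have h3 : xs.length - (i + 1) = n := by omega
    rw [h3]

theorem pvTableB_getD (xs ys : List String) :
    ∀ i, i ≤ xs.length → (pvTableB xs ys).getD i (([] : List (Int × String))) = pvRowFB xs ys i := by
  intro i hi
  cases i with
  | zero => simp [pvTableB, pvRowFB]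
  | succ i =>
    have h0 : pvRowFB xs ys 0 = pvRow0B ys.length := rfl
    have := pvTableBGo_rowFB xs ys xs.length 0 (by omega) (by omega)
    simp only [Nat.cast_zero, zero_add, List.drop_zero, h0, Nat.sub_zero] at this
    simp only [pvTableB, List.getD_cons_succ, this]
    have hlt : i < ((List.range' 1 xs.length).map (pvRowFB xs ys)).length := by
      simp; omega
    rw [List.getD_eq_getElem _ _ hlt, List.getElem_map, List.getElem_range']
    congr 1
    omega

theorem pvGet2_eq_T (xs ys : List String) :
    ∀ i j, i ≤ xs.length → j ≤ ys.length → pvGet2 (pvTableA xs ys) i j = pvT xs ys i j := by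
  intro i j hi hj
  unfold pvGet2
  rw [pvTableA_getD xs ys i hi, pvRowF_getD xs ys i j hj]

-- op-table characterisation
theorem pvOpAt_row0 (xs ys : List String) :
    ∀ j, j ≤ ys.length → pvOpAt (pvTableB xs ys) 0 j = "I" := by
  intro j hj
  unfold pvOpAt
  rw [pvTableB_getD xs ys 0 (by omega)]
  have hlt : j < (pvRowFB xs ys 0).length := by rw [pvRowFB_length]; omega
  rw [List.getD_eq_getElem _ _ hlt]
  show ((pvRow0B ys.length)[j]'(by simpa [pvRowFB] using hlt)).2 = "I"
  simp only [pvRow0B, List.getElem_map]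

theorem pvOpAt_col0 (xs ys : List String) :
    ∀ i, i + 1 ≤ xs.length → pvOpAt (pvTableB xs ys) (i + 1) 0 = "D" := by
  intro i hi
  unfold pvOpAt
  rw [pvTableB_getD xs ys (i + 1) hi]
  simp [pvRowFB]

theorem pvOpAt_succ (xs ys : List String) :
    ∀ i j, i + 1 ≤ xs.length → j + 1 ≤ ys.length →
    pvOpAt (pvTableB xs ys) (i + 1) (j + 1) =
      (if xs.getD i "" = ys.getD j "" then "C"
       else if pvT xs ys i j ≤ pvT xs ys i (j + 1) ∧ pvT xs ys i j ≤ pvT xs ys (i + 1) j then "S"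
       else if pvT xs ys i (j + 1) ≤ pvT xs ys (i + 1) j then "D" else "I") := by
  intro i j hi hj
  unfold pvOpAt
  rw [pvTableB_getD xs ys (i + 1) hi]
  simp only [pvRowFB, List.getD_cons_succ]
  have hj' : j < ys.length := by omega
  have hlB : ys.length + 1 ≤ (pvRowFB xs ys i).length := by rw [pvRowFB_length]
  rw [pvRowBGo_snd _ j ys (pvRowFB xs ys i) _ hj' hlB]
  -- fst of the previous row's entries
  have hprev : ∀ k, k ≤ ys.length → ((pvRowFB xs ys i).getD k (0, "")).1 = pvT xs ys i k := by
    intro k hk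
    rw [← pvFstGetD, pvRowFB_fst, pvRowF_getD xs ys i k hk]
  -- fst of the current row's entries
  have hcur : ∀ k, k ≤ ys.length → (((pvRowBGo (xs.getD i "") (pvRowFB xs ys i) ((i : Int) + 1) ys)).getD k (0, "")).1
      = (pvRowF xs ys (i + 1)).getD (k + 1) 0 := by
    intro k hk
    rw [← pvFstGetD, pvRowBGo_fst, pvRowFB_fst]
    simp [pvRowF]
  rw [hprev j (by omega), hprev (j + 1) hj]
  cases j with
  | zero =>
    have h0 : pvT xs ys (i + 1) 0 = (i : Int) + 1 := by simp [pvT]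
    simp [h0]
  | succ k =>
    simp only [Nat.add_sub_cancel]
    rw [hcur k (by omega), pvRowF_getD xs ys (i + 1) (k + 1) (by omega)]
    simp

-- the two backtraces agree
theorem pvBack_eq (xs ys : List String) :
    ∀ fuel n m, n ≤ xs.length → m ≤ ys.length → n + m ≤ fuel →
    pvBackBGo (pvTableB xs ys) xs ys fuel n m = pvBackA (pvTableA xs ys) xs ys n m := by
  intro fuel
  induction fuel with
  | zero =>
    intro n m hn hm hf
    have hn0 : n = 0 := by omega
    have hm0 : m = 0 := by omega
    subst hn0; subst hm0
    simp [pvBackBGo, pvBackA]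
  | succ fuel ih =>
    intro n m hn hm hf
    match n, m, hn, hm, hf with
    | 0, 0, _, _, _ => simp [pvBackBGo, pvBackA]
    | 0, m + 1, hn, hm, hf =>
      simp only [pvBackBGo]
      rw [if_neg (by omega), pvOpAt_row0 xs ys (m + 1) hm]
      rw [if_neg (by decide), if_neg (by decide)]
      simp only [Nat.add_sub_cancel]
      rw [ih 0 m (by omega) (by omega) (by omega)]
      simp [pvBackA]
    | n + 1, 0, hn, hm, hf =>
      simp only [pvBackBGo]
      rw [if_neg (by omega), pvOpAt_col0 xs ys n hn]
      rw [if_neg (by decide), if_pos rfl]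
      simp only [Nat.add_sub_cancel]
      rw [ih n 0 (by omega) (by omega) (by omega)]
      simp [pvBackA]
    | n + 1, m + 1, hn, hm, hf =>
      simp only [pvBackBGo]
      rw [if_neg (by omega), pvOpAt_succ xs ys n m hn hm]
      have hg1 : pvGet2 (pvTableA xs ys) n m = pvT xs ys n m :=
        pvGet2_eq_T xs ys n m (by omega) (by omega)
      have hg2 : pvGet2 (pvTableA xs ys) n (m + 1) = pvT xs ys n (m + 1) :=
        pvGet2_eq_T xs ys n (m + 1) (by omega) (by omega)
      have hg3 : pvGet2 (pvTableA xs ys) (n + 1) m = pvT xs ys (n + 1) m :=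
        pvGet2_eq_T xs ys (n + 1) m (by omega) (by omega)
      by_cases heq : xs.getD n "" = ys.getD m ""
      · rw [if_pos heq, if_pos (Or.inl rfl)]
        simp only [Nat.add_sub_cancel]
        rw [ih n m (by omega) (by omega) (by omega)]
        conv_rhs => rw [pvBackA]
        rw [if_pos heq.symm]
      · rw [if_neg heq]
        by_cases hS : pvT xs ys n m ≤ pvT xs ys n (m + 1) ∧ pvT xs ys n m ≤ pvT xs ys (n + 1) m
        · rw [if_pos hS, if_pos (Or.inr rfl)]
          simp only [Nat.add_sub_cancel]
          rw [ih n m (by omega) (by omega) (by omega)]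
          conv_rhs => rw [pvBackA]
          rw [if_neg (fun h => heq h.symm), hg1, hg2, hg3, if_pos hS]
        · rw [if_neg hS]
          by_cases hD : pvT xs ys n (m + 1) ≤ pvT xs ys (n + 1) m
          · rw [if_pos hD, if_neg (by decide), if_pos rfl]
            simp only [Nat.add_sub_cancel]
            rw [ih n (m + 1) (by omega) (by omega) (by omega)]
            conv_rhs => rw [pvBackA]
            rw [if_neg (fun h => heq h.symm), hg1, hg2, hg3, if_neg hS, if_pos hD]
          · rw [if_neg hD, if_neg (by decide), if_neg (by decide)]
            simp only [Nat.add_sub_cancel]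
            rw [ih (n + 1) m (by omega) (by omega) (by omega)]
            conv_rhs => rw [pvBackA]
            rw [if_neg (fun h => heq h.symm), hg1, hg2, hg3, if_neg hS, if_neg hD]

-- ===== VERDICT (by name: the statement is the Claim_ definition above) =====
theorem line_edits_spec : Claim_equal_line_edits := by
  intro s1 s2 _
  show line_edits s1 s2 = line_edits_alt s1 s2
  simp only [line_edits, line_edits_alt]
  rw [pvBack_eq _ _ _ _ _ (le_refl _) (le_refl _) (le_refl _)]
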